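-- pv_equiv track=rewrite | github.com/motida/AdventOfCode | aoc_15.py | find_free_xs_in_line
-- ===== SOURCE A (Python) =====
-- Y = 2_000_000
--
-- def find_free_xs_in_line(sensors, beacons, man_dists, Y=Y):
--     no_beacons = set()
--
--     sensors_x_set = set([x for (x, y) in sensors if y==Y])
--     beacons_x_set = set([x for (x, y) in beacons if y==Y])
--     for i, sensor in enumerate(sensors):
--         if sensor[1] - man_dists[i] <= Y <= sensor[1] + man_dists[i]:
--             y_dist = abs(Y-sensor[1])
--             x_dist = man_dists[i] - y_dist
--             xs = set(range(sensor[0] - x_dist, sensor[0] + x_dist + 1))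
--             no_beacons = no_beacons.union(xs)
--
--
--     no_beacons = no_beacons.difference(beacons_x_set)
--     no_beacons = no_beacons.difference(sensors_x_set)
--
--     return no_beacons
-- ===== SOURCE B (Python) =====
-- Y = 2_000_000
--
-- def find_free_xs_in_line(sensors, beacons, man_dists, Y=Y):
--     # Interval subtraction: each sensor's covered interval is clipped against the
--     # intervals of earlier sensors, so every covered x is produced exactly once.
--     out = []
--     covered = []
--     for (sx, sy), d in zip(sensors, man_dists):
--         x_dist = d - abs(Y - sy)
--         if x_dist >= 0:
--             lo, hi = sx - x_dist, sx + x_dist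
--             segs = [(lo, hi)]
--             for (a, b) in covered:
--                 segs = [p for (l, h) in segs
--                         for p in ((l, min(h, a - 1)), (max(l, b + 1), h))
--                         if p[0] <= p[1]]
--             for (l, h) in segs:
--                 out.extend(range(l, h + 1))
--             covered.append((lo, hi))
--     excl = {x for (x, y) in sensors if y == Y} | {x for (x, y) in beacons if y == Y}
--     return {x for x in out if x not in excl}
-- ===== Notes on version B (the rewrite author's own statement) =====
-- stated objective: faster
-- what changed: B replaces the per-sensor set-of-range unions (which rehash every covered x once per overlapping sensor) by interval subtraction: each sensor's interval is clipped against the intervals of earlier sensors, so every covered x is enumerated exactly once; sensor/beacon x's on the line are then filtered out in one pass.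
import Mathlib
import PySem

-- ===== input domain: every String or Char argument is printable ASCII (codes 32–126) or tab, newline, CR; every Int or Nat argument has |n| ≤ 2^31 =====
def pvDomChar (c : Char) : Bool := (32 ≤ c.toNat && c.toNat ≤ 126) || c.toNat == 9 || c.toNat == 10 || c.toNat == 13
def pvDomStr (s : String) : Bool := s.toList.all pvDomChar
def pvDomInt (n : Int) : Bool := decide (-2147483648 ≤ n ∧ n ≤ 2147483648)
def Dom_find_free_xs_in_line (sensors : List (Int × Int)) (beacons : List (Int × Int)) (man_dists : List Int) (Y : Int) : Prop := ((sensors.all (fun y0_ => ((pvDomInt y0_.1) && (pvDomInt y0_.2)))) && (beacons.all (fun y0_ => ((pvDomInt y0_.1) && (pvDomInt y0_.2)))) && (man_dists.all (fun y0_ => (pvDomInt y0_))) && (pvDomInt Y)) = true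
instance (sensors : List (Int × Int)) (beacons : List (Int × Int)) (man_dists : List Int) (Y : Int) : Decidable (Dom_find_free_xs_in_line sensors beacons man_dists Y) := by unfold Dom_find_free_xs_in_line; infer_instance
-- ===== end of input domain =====

-- B replaces A's per-sensor set-of-range unions by interval subtraction against the
-- intervals of earlier sensors, so every covered x is enumerated exactly once (objective: faster).

-- ===== PORT A =====
def find_free_xs_in_line (sensors : List (Int × Int)) (beacons : List (Int × Int)) (man_dists : List Int) (Y : Int) : List Int :=
  let sensors_x_set : PySem.Set Int := PySem.Set.ofList ((sensors.filter (fun p => p.2 == Y)).map Prod.fst)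
  let beacons_x_set : PySem.Set Int := PySem.Set.ofList ((beacons.filter (fun p => p.2 == Y)).map Prod.fst)
  let no_beacons : PySem.Set Int :=
    (PySem.List.enumerate sensors 0).foldl (fun nb is =>
      let sensor := is.2
      let d := PySem.List.pyGetD man_dists is.1 0   -- man_dists[i]; Pre_ puts i in range
      if sensor.2 - d ≤ Y ∧ Y ≤ sensor.2 + d then
        let y_dist := |Y - sensor.2|
        let x_dist := d - y_dist
        let xs : PySem.Set Int := PySem.Set.ofList (PySem.List.pyRange (sensor.1 - x_dist) (sensor.1 + x_dist + 1) 1)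
        PySem.Set.union nb xs
      else nb) PySem.Set.empty
  let nb1 := PySem.Set.diff no_beacons beacons_x_set
  PySem.Set.diff nb1 sensors_x_set

-- ===== PORT B =====
-- split every segment of `segs` against the covered interval `ab`
def pvSplit (segs : List (Int × Int)) (ab : Int × Int) : List (Int × Int) :=
  segs.flatMap (fun lh =>
    [(lh.1, min lh.2 (ab.1 - 1)), (max lh.1 (ab.2 + 1), lh.2)].filter (fun p => p.1 ≤ p.2))

def pvEmit (lh : Int × Int) : List Int := PySem.List.pyRange lh.1 (lh.2 + 1) 1

def find_free_xs_in_line_alt (sensors : List (Int × Int)) (beacons : List (Int × Int)) (man_dists : List Int) (Y : Int) : List Int :=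
  let res :=
    (sensors.zip man_dists).foldl (fun acc sd =>
      let x_dist := sd.2 - |Y - sd.1.2|
      if 0 ≤ x_dist then
        let lo := sd.1.1 - x_dist
        let hi := sd.1.1 + x_dist
        let segs := acc.2.foldl pvSplit [(lo, hi)]
        (acc.1 ++ segs.flatMap pvEmit, acc.2 ++ [(lo, hi)])
      else acc) (([] : List Int), ([] : List (Int × Int)))
  let excl : PySem.Set Int := PySem.Set.union
      (PySem.Set.ofList ((sensors.filter (fun p => p.2 == Y)).map Prod.fst))
      (PySem.Set.ofList ((beacons.filter (fun p => p.2 == Y)).map Prod.fst))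
  PySem.Set.ofList (res.1.filter (fun x => !(PySem.Set.contains excl x)))

-- ===== PRECONDITION & SPEC =====
-- Pre_ excludes only the inputs where A raises IndexError on man_dists[i].
def Pre_find_free_xs_in_line (sensors : List (Int × Int)) (beacons : List (Int × Int)) (man_dists : List Int) (Y : Int) : Prop :=
  sensors.length ≤ man_dists.length
instance (sensors : List (Int × Int)) (beacons : List (Int × Int)) (man_dists : List Int) (Y : Int) : Decidable (Pre_find_free_xs_in_line sensors beacons man_dists Y) := by unfold Pre_find_free_xs_in_line; infer_instance
def pvWitness_find_free_xs_in_line : (List (Int × Int)) × (List (Int × Int)) × List Int × Int := ([(0, 0), (5, 1)], [(2, 0)], [2, 3], 0)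

def Spec_find_free_xs_in_line (sensors : List (Int × Int)) (beacons : List (Int × Int)) (man_dists : List Int) (Y : Int) (out : List Int) : Prop := out = find_free_xs_in_line_alt sensors beacons man_dists Y
instance (sensors : List (Int × Int)) (beacons : List (Int × Int)) (man_dists : List Int) (Y : Int) (out : List Int) : Decidable (Spec_find_free_xs_in_line sensors beacons man_dists Y out) := by unfold Spec_find_free_xs_in_line; infer_instance

-- ===== CLAIM (what is proved, stated in full; the proofs are below) =====
def Claim_equal_find_free_xs_in_line : Prop := ∀ (sensors : List (Int × Int)) (beacons : List (Int × Int)) (man_dists : List Int) (Y : Int), Dom_find_free_xs_in_line sensors beacons man_dists Y → Pre_find_free_xs_in_line sensors beacons man_dists Y → Spec_find_free_xs_in_line sensors beacons man_dists Y (find_free_xs_in_line sensors beacons man_dists Y)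

-- ===== LEMMAS AND PROOFS =====

theorem pv_contains_eq (s : List Int) (x : Int) : PySem.Set.contains s x = decide (x ∈ s) := by simp

-- A's fold over enumerate with man_dists[i] is a fold over sensors.zip man_dists
theorem pv_foldl_enum_getD {S : Type} (g : S → (Int × Int) → Int → S) :
    ∀ (ss : List (Int × Int)) (pre suf : List Int) (init : S), ss.length ≤ suf.length →
      (PySem.List.enumerate ss (pre.length : Int)).foldl
          (fun nb is => g nb is.2 (PySem.List.pyGetD (pre ++ suf) is.1 0)) init
        = (ss.zip suf).foldl (fun nb sd => g nb sd.1 sd.2) init := by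
  intro ss
  induction ss with
  | nil => intro pre suf init _; simp [PySem.List.enumerate]
  | cons x xs ih =>
    intro pre suf init hlen
    cases suf with
    | nil => simp at hlen
    | cons m ms =>
      rw [PySem.List.enumerate_cons]
      simp only [List.foldl_cons, List.zip_cons_cons]
      have hd : PySem.List.pyGetD (pre ++ m :: ms) (pre.length : Int) 0 = m := by
        rw [PySem.List.pyGetD_natCast]
        simp [List.getD_eq_getElem?_getD, List.getElem?_append_right (le_refl pre.length)]
      rw [hd]
      have hcast : (pre.length : Int) + 1 = ((pre ++ [m]).length : Int) := by
        simp
      have happ : pre ++ m :: ms = (pre ++ [m]) ++ ms := by simp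
      rw [hcast, happ]
      exact ih (pre ++ [m]) ms (g init x m) (by simpa using hlen)

theorem pv_foldl_enum_getD0 {S : Type} (g : S → (Int × Int) → Int → S)
    (ss : List (Int × Int)) (md : List Int) (init : S) (h : ss.length ≤ md.length) :
    (PySem.List.enumerate ss 0).foldl
        (fun nb is => g nb is.2 (PySem.List.pyGetD md is.1 0)) init
      = (ss.zip md).foldl (fun nb sd => g nb sd.1 sd.2) init := by
  have := pv_foldl_enum_getD g ss [] md init h
  simpa using this

-- core: removing [a,b] from the integer range [l,h] leaves two ranges
theorem pv_range_filter_out (a b : Int) (hab : a ≤ b) :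
    ∀ (n : Nat) (l h : Int), (h + 1 - l).toNat = n →
      PySem.List.pyRange l (min h (a - 1) + 1) ++ PySem.List.pyRange (max l (b + 1)) (h + 1)
        = (PySem.List.pyRange l (h + 1)).filter (fun x => !(decide (a ≤ x) && decide (x ≤ b))) := by
  intro n
  induction n with
  | zero =>
    intro l h hn
    have hl : h < l := by omega
    rw [PySem.List.pyRange_one_eq_nil (by omega), PySem.List.pyRange_one_eq_nil (by omega),
        PySem.List.pyRange_one_eq_nil (by omega)]
    simp
  | succ n ih =>
    intro l h hn
    have hl : l ≤ h := by omega
    rw [PySem.List.pyRange_one_cons (show l < h + 1 by omega)]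
    by_cases hin : a ≤ l ∧ l ≤ b
    · -- l is covered: dropped on the right; left range empty on both sides
      have h1 : PySem.List.pyRange l (min h (a - 1) + 1) = [] :=
        PySem.List.pyRange_one_eq_nil (by omega)
      have h2 : PySem.List.pyRange (l + 1) (min h (a - 1) + 1) = [] :=
        PySem.List.pyRange_one_eq_nil (by omega)
      have h3 : max l (b + 1) = b + 1 := by omega
      have h4 : max (l + 1) (b + 1) = b + 1 := by omega
      have hrec := ih (l + 1) h (by omega)
      rw [h2, h4] at hrec
      rw [h1, h3, List.nil_append, List.filter_cons_of_neg (by simp [hin.1, hin.2])]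
      exact hrec
    · rw [List.filter_cons_of_pos (by by_cases ha : a ≤ l <;> by_cases hb : l ≤ b <;>
          simp [ha, hb] <;> omega)]
      have hrec := ih (l + 1) h (by omega)
      by_cases ha : l < a
      · -- l left of [a,b]
        have h4 : max l (b + 1) = max (l + 1) (b + 1) := by omega
        rw [PySem.List.pyRange_one_cons (show l < min h (a - 1) + 1 by omega), h4,
            List.cons_append]
        exact congrArg (l :: ·) hrec
      · -- l right of [a,b] (since l not inside)
        have hb : b < l := by omega
        have h1 : PySem.List.pyRange l (min h (a - 1) + 1) = [] :=
          PySem.List.pyRange_one_eq_nil (by omega)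
        have h2 : PySem.List.pyRange (l + 1) (min h (a - 1) + 1) = [] :=
          PySem.List.pyRange_one_eq_nil (by omega)
        have h3 : max l (b + 1) = l := by omega
        have h4 : max (l + 1) (b + 1) = l + 1 := by omega
        rw [h2, h4, List.nil_append] at hrec
        rw [h1, h3, List.nil_append, PySem.List.pyRange_one_cons (show l < h + 1 by omega)]
        exact congrArg (l :: ·) hrec

theorem pv_emit_split_one (a b l h : Int) (hab : a ≤ b) :
    ([((l, min h (a - 1)) : Int × Int), (max l (b + 1), h)].filter
        (fun p => decide (p.1 ≤ p.2))).flatMap pvEmit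
      = (pvEmit (l, h)).filter (fun x => !(decide (a ≤ x) && decide (x ≤ b))) := by
  have key := pv_range_filter_out a b hab ((h + 1 - l).toNat) l h rfl
  have hemit : ∀ p : Int × Int, ¬ p.1 ≤ p.2 → pvEmit p = [] := by
    intro p hp
    exact PySem.List.pyRange_one_eq_nil (by omega)
  have e1 : ([((l, min h (a - 1)) : Int × Int), (max l (b + 1), h)].filter
        (fun p => decide (p.1 ≤ p.2))).flatMap pvEmit
      = pvEmit (l, min h (a - 1)) ++ pvEmit (max l (b + 1), h) := by
    by_cases c1 : l ≤ min h (a - 1) <;> by_cases c2 : max l (b + 1) ≤ h <;>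
      simp only [List.filter_cons, List.filter_nil, decide_eq_true_eq, c1, c2, if_true, if_false,
        List.flatMap_cons, List.flatMap_nil, List.append_nil, List.nil_append]
    · rw [hemit (max l (b + 1), h) (by simpa using c2)]; simp
    · rw [hemit (l, min h (a - 1)) (by simpa using c1)]; simp
    · rw [hemit (l, min h (a - 1)) (by simpa using c1),
          hemit (max l (b + 1), h) (by simpa using c2)]; simp
  rw [e1]
  exact key

theorem pv_emit_split (ab : Int × Int) (hab : ab.1 ≤ ab.2) (segs : List (Int × Int)) :
    (pvSplit segs ab).flatMap pvEmit
      = (segs.flatMap pvEmit).filter (fun x => !(decide (ab.1 ≤ x) && decide (x ≤ ab.2))) := by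
  unfold pvSplit
  rw [List.flatMap_assoc, List.filter_flatMap]
  apply List.flatMap_congr
  intro lh _
  exact pv_emit_split_one ab.1 ab.2 lh.1 lh.2 hab

theorem pv_emit_foldl_split :
    ∀ (cov : List (Int × Int)) (segs : List (Int × Int)), (∀ ab ∈ cov, ab.1 ≤ ab.2) →
      ((cov.foldl pvSplit segs).flatMap pvEmit)
        = (segs.flatMap pvEmit).filter
            (fun x => cov.all (fun ab => !(decide (ab.1 ≤ x) && decide (x ≤ ab.2)))) := by
  intro cov
  induction cov with
  | nil => intro segs _; simp
  | cons ab cov ih =>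
    intro segs hb
    rw [List.foldl_cons, ih (pvSplit segs ab) (fun x hx => hb x (List.mem_cons_of_mem _ hx)),
        pv_emit_split ab (hb ab (List.mem_cons_self)) segs, List.filter_filter]
    apply List.filter_congr
    intro x _
    simp [List.all_cons, Bool.and_comm]

-- the central invariant: A's running set equals B's output list
theorem pv_main_fold (Y : Int) :
    ∀ (zs : List ((Int × Int) × Int)) (nb : List Int) (covered : List (Int × Int)),
      nb.Nodup → (∀ ab ∈ covered, ab.1 ≤ ab.2) →
      (∀ x : Int, x ∈ nb ↔ ∃ ab ∈ covered, ab.1 ≤ x ∧ x ≤ ab.2) →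
      zs.foldl
          (fun nb sd =>
            if sd.1.2 - sd.2 ≤ Y ∧ Y ≤ sd.1.2 + sd.2 then
              PySem.Set.union nb
                (PySem.Set.ofList
                  (PySem.List.pyRange (sd.1.1 - (sd.2 - |Y - sd.1.2|))
                    (sd.1.1 + (sd.2 - |Y - sd.1.2|) + 1)))
            else nb) nb
        = (zs.foldl
            (fun acc sd =>
              if 0 ≤ sd.2 - |Y - sd.1.2| then
                (acc.1 ++
                    ((acc.2.foldl pvSplit
                        [(sd.1.1 - (sd.2 - |Y - sd.1.2|), sd.1.1 + (sd.2 - |Y - sd.1.2|))]).flatMap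
                      pvEmit),
                  acc.2 ++ [(sd.1.1 - (sd.2 - |Y - sd.1.2|), sd.1.1 + (sd.2 - |Y - sd.1.2|))])
              else acc) (nb, covered)).1 := by
  intro zs
  induction zs with
  | nil => intro nb covered _ _ _; rfl
  | cons sd zs ih =>
    intro nb covered hnd hb hmem
    simp only [List.foldl_cons]
    have hcond : (sd.1.2 - sd.2 ≤ Y ∧ Y ≤ sd.1.2 + sd.2) ↔ 0 ≤ sd.2 - |Y - sd.1.2| := by
      rcases abs_cases (Y - sd.1.2) with ⟨h1, _⟩ | ⟨h1, _⟩ <;> rw [h1] <;> omega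
    by_cases hif : 0 ≤ sd.2 - |Y - sd.1.2|
    · rw [if_pos (hcond.mpr hif), if_pos hif]
      set xd := sd.2 - |Y - sd.1.2| with hxd
      set lo := sd.1.1 - xd with hlo
      set hi := sd.1.1 + xd with hhi
      have hrange : PySem.Set.ofList (PySem.List.pyRange lo (hi + 1))
          = PySem.List.pyRange lo (hi + 1) :=
        PySem.Set.ofList_eq_self_of_nodup _ (PySem.List.nodup_pyRange_one lo (hi + 1))
      have hunion : PySem.Set.union nb (PySem.Set.ofList (PySem.List.pyRange lo (hi + 1)))
          = nb ++ (PySem.List.pyRange lo (hi + 1)).filter (fun y => !(PySem.Set.contains nb y)) := by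
        have := PySem.Set.update_eq_append_filter nb (PySem.Set.ofList (PySem.List.pyRange lo (hi + 1)))
        rw [PySem.Set.ofList_ofList, hrange] at this
        unfold PySem.Set.union
        rw [hrange]
        exact this
      have hblock : (PySem.List.pyRange lo (hi + 1)).filter (fun y => !(PySem.Set.contains nb y))
          = (covered.foldl pvSplit [(lo, hi)]).flatMap pvEmit := by
        rw [pv_emit_foldl_split covered [(lo, hi)] hb]
        have hone : ([((lo, hi) : Int × Int)].flatMap pvEmit) = PySem.List.pyRange lo (hi + 1) := by
          simp [pvEmit]
        rw [hone]
        apply List.filter_congr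
        intro x _
        rw [pv_contains_eq]
        have hx := hmem x
        by_cases hxm : x ∈ nb
        · obtain ⟨ab, habm, hab1, hab2⟩ := hx.mp hxm
          simp only [hxm, decide_true, Bool.not_true]
          exact ((List.all_eq_false).mpr ⟨ab, habm, by simp [hab1, hab2]⟩).symm
        · simp only [hxm, decide_false, Bool.not_false]
          refine ((List.all_eq_true).mpr ?_).symm
          intro ab habm
          by_cases h1 : ab.1 ≤ x <;> by_cases h2 : x ≤ ab.2 <;> simp [h1, h2]
          exact hxm (hx.mpr ⟨ab, habm, h1, h2⟩)
      rw [hunion, hblock]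
      -- apply the induction hypothesis with the new state
      apply ih
      · -- nodup of the appended block
        rw [← hblock]
        refine List.Nodup.append hnd
          ((PySem.List.nodup_pyRange_one lo (hi + 1)).filter _) ?_
        intro x hx1 hx2
        have := List.of_mem_filter hx2
        rw [pv_contains_eq] at this
        simp at this
        exact this hx1
      · intro ab habm
        rcases List.mem_append.mp habm with h | h
        · exact hb ab h
        · simp at h; subst h; simp only []; omega
      · intro x
        rw [← hblock, List.mem_append, List.mem_filter]
        constructor
        · rintro (hxm | ⟨hxr, _⟩)
          · obtain ⟨ab, habm, h1, h2⟩ := (hmem x).mp hxm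
            exact ⟨ab, List.mem_append.mpr (Or.inl habm), h1, h2⟩
          · have := PySem.List.mem_pyRange_one.mp hxr
            exact ⟨(lo, hi), List.mem_append.mpr (Or.inr (by simp)), by omega, by omega⟩
        · rintro ⟨ab, habm, h1, h2⟩
          rcases List.mem_append.mp habm with h | h
          · exact Or.inl ((hmem x).mpr ⟨ab, h, h1, h2⟩)
          · have hab : ab = (lo, hi) := by simpa using h
            have h1' : lo ≤ x := by rw [hab] at h1; exact h1
            have h2' : x ≤ hi := by rw [hab] at h2; exact h2
            by_cases hxm : x ∈ nb
            · exact Or.inl hxm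
            · refine Or.inr ⟨PySem.List.mem_pyRange_one.mpr ⟨h1', by omega⟩, ?_⟩
              rw [pv_contains_eq]
              simp [hxm]
    · rw [if_neg (fun hc => hif (hcond.mp hc)), if_neg hif]
      exact ih nb covered hnd hb hmem

-- ===== VERDICT (by name: the statement is the Claim_ definition above) =====
theorem pv_fold_nodup (Y : Int) :
    ∀ (zs : List ((Int × Int) × Int)) (nb : List Int), nb.Nodup →
      (zs.foldl
          (fun nb sd =>
            if sd.1.2 - sd.2 ≤ Y ∧ Y ≤ sd.1.2 + sd.2 then
              PySem.Set.union nb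
                (PySem.Set.ofList
                  (PySem.List.pyRange (sd.1.1 - (sd.2 - |Y - sd.1.2|))
                    (sd.1.1 + (sd.2 - |Y - sd.1.2|) + 1)))
            else nb) nb).Nodup := by
  intro zs
  induction zs with
  | nil => intro nb h; exact h
  | cons sd zs ih =>
    intro nb h
    rw [List.foldl_cons]
    by_cases hc : sd.1.2 - sd.2 ≤ Y ∧ Y ≤ sd.1.2 + sd.2
    · rw [if_pos hc]; exact ih _ (PySem.Set.nodup_union _ _ h)
    · rw [if_neg hc]; exact ih _ h

theorem find_free_xs_in_line_spec : Claim_equal_find_free_xs_in_line := by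
  intro sensors beacons man_dists Y _ hpre
  unfold Spec_find_free_xs_in_line find_free_xs_in_line find_free_xs_in_line_alt
  show PySem.Set.diff
      (PySem.Set.diff
        ((PySem.List.enumerate sensors 0).foldl
          (fun nb is =>
            if is.2.2 - PySem.List.pyGetD man_dists is.1 0 ≤ Y ∧
                Y ≤ is.2.2 + PySem.List.pyGetD man_dists is.1 0 then
              PySem.Set.union nb
                (PySem.Set.ofList
                  (PySem.List.pyRange
                    (is.2.1 - (PySem.List.pyGetD man_dists is.1 0 - |Y - is.2.2|))
                    (is.2.1 + (PySem.List.pyGetD man_dists is.1 0 - |Y - is.2.2|) + 1)))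
            else nb) ([] : List Int))
        (PySem.Set.ofList ((beacons.filter (fun p => p.2 == Y)).map Prod.fst)))
      (PySem.Set.ofList ((sensors.filter (fun p => p.2 == Y)).map Prod.fst))
    = PySem.Set.ofList
        (((sensors.zip man_dists).foldl
            (fun acc sd =>
              if 0 ≤ sd.2 - |Y - sd.1.2| then
                (acc.1 ++
                    ((acc.2.foldl pvSplit
                        [(sd.1.1 - (sd.2 - |Y - sd.1.2|), sd.1.1 + (sd.2 - |Y - sd.1.2|))]).flatMap
                      pvEmit),
                  acc.2 ++ [(sd.1.1 - (sd.2 - |Y - sd.1.2|), sd.1.1 + (sd.2 - |Y - sd.1.2|))])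
              else acc) (([] : List Int), ([] : List (Int × Int)))).1.filter
          (fun x =>
            !(PySem.Set.contains
                (PySem.Set.union
                  (PySem.Set.ofList ((sensors.filter (fun p => p.2 == Y)).map Prod.fst))
                  (PySem.Set.ofList ((beacons.filter (fun p => p.2 == Y)).map Prod.fst))) x)))
  rw [pv_foldl_enum_getD0
      (fun nb sensor d =>
        if sensor.2 - d ≤ Y ∧ Y ≤ sensor.2 + d then
          PySem.Set.union nb
            (PySem.Set.ofList
              (PySem.List.pyRange (sensor.1 - (d - |Y - sensor.2|))
                (sensor.1 + (d - |Y - sensor.2|) + 1)))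
        else nb) sensors man_dists ([] : List Int) hpre]
  have hnodupA : ((sensors.zip man_dists).foldl
      (fun nb sd =>
        if sd.1.2 - sd.2 ≤ Y ∧ Y ≤ sd.1.2 + sd.2 then
          PySem.Set.union nb
            (PySem.Set.ofList
              (PySem.List.pyRange (sd.1.1 - (sd.2 - |Y - sd.1.2|))
                (sd.1.1 + (sd.2 - |Y - sd.1.2|) + 1)))
        else nb) ([] : List Int)).Nodup :=
    pv_fold_nodup Y (sensors.zip man_dists) [] List.nodup_nil
  rw [pv_main_fold Y (sensors.zip man_dists) [] [] List.nodup_nil (by simp) (by simp)] at hnodupA ⊢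
  set out := ((sensors.zip man_dists).foldl
      (fun acc sd =>
        if 0 ≤ sd.2 - |Y - sd.1.2| then
          (acc.1 ++
              ((acc.2.foldl pvSplit
                  [(sd.1.1 - (sd.2 - |Y - sd.1.2|), sd.1.1 + (sd.2 - |Y - sd.1.2|))]).flatMap
                pvEmit),
            acc.2 ++ [(sd.1.1 - (sd.2 - |Y - sd.1.2|), sd.1.1 + (sd.2 - |Y - sd.1.2|))])
        else acc) (([] : List Int), ([] : List (Int × Int)))).1 with hout
  set bset := PySem.Set.ofList ((beacons.filter (fun p => p.2 == Y)).map Prod.fst) with hbset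
  set sset := PySem.Set.ofList ((sensors.filter (fun p => p.2 == Y)).map Prod.fst) with hsset
  show ((out.filter (fun x => !(PySem.Set.contains bset x))).filter
      (fun x => !(PySem.Set.contains sset x)))
    = PySem.Set.ofList (out.filter (fun x => !(PySem.Set.contains (PySem.Set.union sset bset) x)))
  rw [PySem.Set.ofList_eq_self_of_nodup _ (hnodupA.filter _), List.filter_filter]
  apply List.filter_congr
  intro x _
  by_cases hs : x ∈ sset <;> by_cases hb : x ∈ bset <;>
    simp [pv_contains_eq, hs, hb, PySem.Set.mem_union]
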